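-- pv_equiv track=rewrite | github.com/MrBrantCode/unitest_baseline | mut_generate/mist_train_cf/cf_51346/solution.py | get_positive_and_sort
-- ===== SOURCE A (Python) =====
-- def get_positive_and_sort(l: list):
--     def swap_elements(n: list, index1: int, index2: int):
--         """Swap two elements in a list based on their indices."""
--         n[index1], n[index2] = n[index2], n[index1]
--
--     def bubble_sort(n: list):
--         """Sort a list in place using the bubble sort algorithm."""
--         for i in range(len(n)):
--             for j in range(len(n) - 1):
--                 if n[j] > n[j + 1]:
--                     swap_elements(n, j, j + 1)
--
--     positive_nums = [num for num in l if num > 0]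
--     bubble_sort(positive_nums)
--     return positive_nums
-- ===== SOURCE B (Python) =====
-- def get_positive_and_sort(l: list):
--     def merge(xs, ys):
--         out = []
--         i = j = 0
--         while i < len(xs) and j < len(ys):
--             if xs[i] <= ys[j]:
--                 out.append(xs[i]); i += 1
--             else:
--                 out.append(ys[j]); j += 1
--         out.extend(xs[i:])
--         out.extend(ys[j:])
--         return out
--
--     def msort(n):
--         if len(n) <= 1:
--             return n
--         mid = len(n) // 2
--         return merge(msort(n[:mid]), msort(n[mid:]))
--
--     return msort([num for num in l if num > 0])
-- ===== Notes on version B (the rewrite author's own statement) =====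
-- stated objective: alternative
-- what changed: Replaced the hand-rolled bubble sort (len(n) full adjacent-swap passes) on the positive-filtered list by a recursive top-down merge sort (split at the midpoint, sort halves, merge with two indices).
import Mathlib
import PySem

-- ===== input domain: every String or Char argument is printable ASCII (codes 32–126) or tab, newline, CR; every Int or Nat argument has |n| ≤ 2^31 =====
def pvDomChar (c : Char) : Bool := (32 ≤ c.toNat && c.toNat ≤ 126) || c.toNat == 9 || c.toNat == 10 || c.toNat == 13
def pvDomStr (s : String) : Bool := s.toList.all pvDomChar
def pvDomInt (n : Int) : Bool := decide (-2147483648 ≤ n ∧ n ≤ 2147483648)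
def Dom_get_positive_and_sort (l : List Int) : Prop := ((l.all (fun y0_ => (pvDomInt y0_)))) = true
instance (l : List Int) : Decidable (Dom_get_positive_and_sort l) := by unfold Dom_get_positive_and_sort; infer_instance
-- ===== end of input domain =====

-- B replaces A's quadratic bubble sort of the positive-filtered list by a top-down merge sort (same filter, same result).

-- ===== PORT A =====
-- one inner pass of A's bubble_sort: j walks adjacent pairs, swapping when n[j] > n[j+1]
def pvBubblePass : List Int → List Int
  | a :: b :: rest => if a > b then b :: pvBubblePass (a :: rest) else a :: pvBubblePass (b :: rest)
  | l => l

def get_positive_and_sort (l : List Int) : List Int :=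
  let positive_nums := l.filter (fun num => decide (num > 0))
  -- outer loop: for i in range(len(n)) do one inner pass
  (List.range positive_nums.length).foldl (fun n _ => pvBubblePass n) positive_nums

-- ===== PORT B =====
-- Source B's merge: walk both sorted halves, taking the smaller front element
def pvMerge : List Int → List Int → List Int
  | [], ys => ys
  | x :: xs, [] => x :: xs
  | x :: xs, y :: ys =>
    if x ≤ y then x :: pvMerge xs (y :: ys) else y :: pvMerge (x :: xs) ys
termination_by xs ys => xs.length + ys.length

def pvMsort (n : List Int) : List Int :=
  if n.length ≤ 1 then n
  else pvMerge (pvMsort (n.take (n.length / 2))) (pvMsort (n.drop (n.length / 2)))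
termination_by n.length
decreasing_by
  · simp only [List.length_take]; omega
  · simp only [List.length_drop]; omega

def get_positive_and_sort_alt (l : List Int) : List Int :=
  pvMsort (l.filter (fun num => decide (num > 0)))

-- ===== PRECONDITION & SPEC =====
def Spec_get_positive_and_sort (l : List Int) (out : List Int) : Prop := out = get_positive_and_sort_alt l
instance (l : List Int) (out : List Int) : Decidable (Spec_get_positive_and_sort l out) := by unfold Spec_get_positive_and_sort; infer_instance

-- ===== CLAIM (what is proved, stated in full; the proofs are below) =====
def Claim_equal_get_positive_and_sort : Prop := ∀ (l : List Int), Dom_get_positive_and_sort l → Spec_get_positive_and_sort l (get_positive_and_sort l)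

-- ===== LEMMAS AND PROOFS =====

theorem pvBubblePass_perm (l : List Int) : List.Perm (pvBubblePass l) l := by
  induction l using pvBubblePass.induct with
  | case1 a b rest h ih =>
    rw [pvBubblePass, if_pos h]
    exact ((ih.cons b).trans (List.Perm.swap a b rest))
  | case2 a b rest h ih =>
    rw [pvBubblePass, if_neg h]
    exact ih.cons a
  | case3 l h1 =>
    match l, h1 with
    | [], _ => simp [pvBubblePass]
    | [a], _ => simp [pvBubblePass]
    | a :: b :: rest, h1 => exact absurd rfl (h1 a b rest)

theorem pvBubblePass_mem {x : Int} {l : List Int} (h : x ∈ pvBubblePass l) : x ∈ l :=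
  (pvBubblePass_perm l).mem_iff.mp h

theorem pvBubblePass_max_last (a : Int) (l : List Int) :
    ∃ ys M, pvBubblePass (a :: l) = ys ++ [M] ∧ ∀ x ∈ a :: l, x ≤ M := by
  induction l generalizing a with
  | nil => exact ⟨[], a, by simp [pvBubblePass], by simp⟩
  | cons b rest ih =>
    by_cases h : a > b
    · obtain ⟨ys, M, heq, hb⟩ := ih a
      refine ⟨b :: ys, M, ?_, ?_⟩
      · rw [pvBubblePass, if_pos h, heq]; rfl
      · intro x hx
        rcases List.mem_cons.mp hx with rfl | hx
        · exact hb x (by simp)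
        rcases List.mem_cons.mp hx with rfl | hx
        · exact le_trans (le_of_lt h) (hb a (by simp))
        · exact hb x (by simp [hx])
    · obtain ⟨ys, M, heq, hb⟩ := ih b
      refine ⟨a :: ys, M, ?_, ?_⟩
      · rw [pvBubblePass, if_neg h, heq]; rfl
      · intro x hx
        rcases List.mem_cons.mp hx with rfl | hx
        · exact le_trans (not_lt.mp h) (hb b (by simp))
        · exact hb x hx

theorem pvBubblePass_append_max (m : Int) (xs : List Int) (hm : ∀ x ∈ xs, x ≤ m) :
    pvBubblePass (xs ++ [m]) = pvBubblePass xs ++ [m] := by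
  induction xs using pvBubblePass.induct with
  | case1 a b rest h ih =>
    rw [List.cons_append] at ih
    rw [List.cons_append, List.cons_append, pvBubblePass, if_pos h,
        ih (by intro x hx; apply hm; rcases List.mem_cons.mp hx with rfl | hx <;> simp [hx]),
        pvBubblePass, if_pos h, List.cons_append]
  | case2 a b rest h ih =>
    rw [List.cons_append] at ih
    rw [List.cons_append, List.cons_append, pvBubblePass, if_neg h,
        ih (by intro x hx; apply hm; rcases List.mem_cons.mp hx with rfl | hx <;> simp [hx]),
        pvBubblePass, if_neg h, List.cons_append]
  | case3 l h1 =>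
    match l, h1 with
    | [], _ => simp [pvBubblePass]
    | [a], _ =>
      have ha : ¬ a > m := not_lt.mpr (hm a (by simp))
      simp [pvBubblePass, ha]
    | a :: b :: rest, h1 => exact absurd rfl (h1 a b rest)

theorem pvBubblePass_iter_append_max (k : Nat) (m : Int) :
    ∀ zs : List Int, (∀ x ∈ zs, x ≤ m) →
      pvBubblePass^[k] (zs ++ [m]) = pvBubblePass^[k] zs ++ [m] := by
  induction k with
  | zero => intro zs _; rfl
  | succ k ih =>
    intro zs hzs
    rw [Function.iterate_succ_apply, Function.iterate_succ_apply,
        pvBubblePass_append_max m zs hzs]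
    exact ih _ (fun x hx => hzs x (pvBubblePass_mem hx))

theorem pvBubblePass_iter_perm (k : Nat) (l : List Int) : List.Perm (pvBubblePass^[k] l) l := by
  induction k with
  | zero => rfl
  | succ k ih =>
    rw [Function.iterate_succ_apply']
    exact (pvBubblePass_perm _).trans ih

theorem pvBubblePass_iter_sorted (k : Nat) :
    ∀ l : List Int, l.length ≤ k → List.Pairwise (· ≤ ·) (pvBubblePass^[k] l) := by
  induction k with
  | zero =>
    intro l hl
    have h0 : l = [] := List.eq_nil_of_length_eq_zero (Nat.le_zero.mp hl)
    simp [h0]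
  | succ k ih =>
    intro l hl
    match l with
    | [] =>
      rw [Function.iterate_succ_apply]
      exact ih (pvBubblePass []) (by simp [pvBubblePass])
    | a :: t =>
      obtain ⟨ys, M, heq, hb⟩ := pvBubblePass_max_last a t
      have hysmem : ∀ x ∈ ys, x ≤ M := by
        intro x hx
        exact hb x ((pvBubblePass_perm (a :: t)).mem_iff.mp (by rw [heq]; simp [hx]))
      have hyslen : ys.length ≤ k := by
        have hlen : (pvBubblePass (a :: t)).length = t.length + 1 :=
          (pvBubblePass_perm (a :: t)).length_eq
        rw [heq] at hlen; simp at hlen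
        simp at hl; omega
      rw [Function.iterate_succ_apply, heq,
          pvBubblePass_iter_append_max k M ys hysmem]
      rw [List.pairwise_append]
      refine ⟨ih ys hyslen, by simp, ?_⟩
      intro x hx y hy
      rw [List.mem_singleton] at hy; subst hy
      exact hysmem x ((pvBubblePass_iter_perm k ys).mem_iff.mp hx)

theorem foldl_range_pass (k : Nat) (l : List Int) :
    (List.range k).foldl (fun n _ => pvBubblePass n) l = pvBubblePass^[k] l := by
  induction k with
  | zero => rfl
  | succ k ih =>
    rw [List.range_succ, List.foldl_append, ih, List.foldl_cons, List.foldl_nil,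
        Function.iterate_succ_apply']

theorem pvMerge_perm (xs ys : List Int) : List.Perm (pvMerge xs ys) (xs ++ ys) := by
  induction xs, ys using pvMerge.induct with
  | case1 ys => simp [pvMerge]
  | case2 x xs => simp [pvMerge]
  | case3 x xs y ys h ih =>
    rw [pvMerge, if_pos h]
    exact ih.cons x
  | case4 x xs y ys h ih =>
    rw [pvMerge, if_neg h]
    refine (ih.cons y).trans ?_
    simpa using (List.perm_middle (a := y) (l₁ := x :: xs) (l₂ := ys)).symm

theorem pvMerge_sorted {xs ys : List Int} (hxs : List.Pairwise (· ≤ ·) xs)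
    (hys : List.Pairwise (· ≤ ·) ys) : List.Pairwise (· ≤ ·) (pvMerge xs ys) := by
  induction xs, ys using pvMerge.induct with
  | case1 ys => simpa [pvMerge] using hys
  | case2 x xs => simpa [pvMerge] using hxs
  | case3 x xs y ys h ih =>
    rw [pvMerge, if_pos h]
    rw [List.pairwise_cons] at hxs ⊢
    refine ⟨?_, ih hxs.2 hys⟩
    intro b hb
    rcases (List.mem_append.mp ((pvMerge_perm xs (y :: ys)).mem_iff.mp hb)) with hb | hb
    · exact hxs.1 b hb
    · rcases List.mem_cons.mp hb with rfl | hb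
      · exact h
      · exact le_trans h ((List.pairwise_cons.mp hys).1 b hb)
  | case4 x xs y ys h ih =>
    rw [pvMerge, if_neg h]
    rw [List.pairwise_cons] at hys ⊢
    refine ⟨?_, ih hxs hys.2⟩
    intro b hb
    rcases (List.mem_append.mp ((pvMerge_perm (x :: xs) ys).mem_iff.mp hb)) with hb | hb
    · rcases List.mem_cons.mp hb with rfl | hb
      · exact le_of_lt (not_le.mp h)
      · exact le_trans (le_of_lt (not_le.mp h)) ((List.pairwise_cons.mp hxs).1 b hb)
    · exact hys.1 b hb

theorem pvMsort_perm (n : List Int) : List.Perm (pvMsort n) n := by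
  induction n using pvMsort.induct with
  | case1 n h => rw [pvMsort, if_pos h]
  | case2 n h ih1 ih2 =>
    rw [pvMsort, if_neg h]
    refine (pvMerge_perm _ _).trans ?_
    have := (ih1.append ih2)
    rw [List.take_append_drop] at this
    exact this

theorem pvMsort_sorted (n : List Int) : List.Pairwise (· ≤ ·) (pvMsort n) := by
  induction n using pvMsort.induct with
  | case1 n h =>
    rw [pvMsort, if_pos h]
    match n, h with
    | [], _ => exact List.Pairwise.nil
    | [a], _ => simp
  | case2 n h ih1 ih2 =>
    rw [pvMsort, if_neg h]
    exact pvMerge_sorted ih1 ih2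

-- ===== VERDICT (by name: the statement is the Claim_ definition above) =====
theorem get_positive_and_sort_spec : Claim_equal_get_positive_and_sort := by
  intro l _
  unfold Spec_get_positive_and_sort get_positive_and_sort get_positive_and_sort_alt
  set p := l.filter (fun num => decide (num > 0)) with hp
  rw [foldl_range_pass]
  exact List.Perm.eq_of_pairwise' (pvBubblePass_iter_sorted p.length p le_rfl)
    (pvMsort_sorted p) ((pvBubblePass_iter_perm _ p).trans (pvMsort_perm p).symm)
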